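-- pv_equiv track=rewrite | github.com/aciderix/Graph-Systems-Exploration | numerical_semigroups/phases/N6_proof_conjA_L4.py | check_decomposable_count
-- ===== SOURCE A (Python) =====
-- def check_decomposable_count(kunz, m):
--     """Count decomposable elements for a Kunz tuple."""
--     n = m - 1
--     count = 0
--     for r in range(n):
--         r_res = r + 1
--         found = False
--         for i in range(n):
--             i_res = i + 1
--             j_res = (r_res - i_res) % m
--             if j_res == 0: continue
--             j = j_res - 1
--             overflow = (i_res + j_res) // m
--             if kunz[i] + kunz[j] + overflow == kunz[r]:
--                 found = True
--                 break
--         if found: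
--             count += 1
--     return count
-- ===== SOURCE B (Python) =====
-- def check_decomposable_count(kunz, m):
--     """Count decomposable elements for a Kunz tuple."""
--     n = m - 1
--     # Single pass over all pairs (i, j): index every decomposition value by its residue.
--     table = {}
--     for i in range(n):
--         for j in range(n):
--             s = (i + 1) + (j + 1)
--             r_res = s % m
--             if r_res == 0:
--                 continue
--             table.setdefault(r_res, set()).add(kunz[i] + kunz[j] + s // m)
--     # Second pass: r is decomposable iff kunz[r] appears in the value-set of residue r+1.
--     count = 0
--     for r in range(n):
--         vals = table.get(r + 1)
--         if vals is not None and kunz[r] in vals: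
--             count += 1
--     return count
-- ===== Notes on version B (the rewrite author's own statement) =====
-- stated objective: alternative
-- what changed: Replaced the per-target inner scan with early exit by a build-index-then-lookup scheme: one pass over all pairs (i,j) fills a dict mapping each nonzero residue (i+j+2)%m to the set of decomposition values kunz[i]+kunz[j]+(i+j+2)//m, then a second pass counts each r whose kunz[r] lies in the set for residue r+1.
import Mathlib
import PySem

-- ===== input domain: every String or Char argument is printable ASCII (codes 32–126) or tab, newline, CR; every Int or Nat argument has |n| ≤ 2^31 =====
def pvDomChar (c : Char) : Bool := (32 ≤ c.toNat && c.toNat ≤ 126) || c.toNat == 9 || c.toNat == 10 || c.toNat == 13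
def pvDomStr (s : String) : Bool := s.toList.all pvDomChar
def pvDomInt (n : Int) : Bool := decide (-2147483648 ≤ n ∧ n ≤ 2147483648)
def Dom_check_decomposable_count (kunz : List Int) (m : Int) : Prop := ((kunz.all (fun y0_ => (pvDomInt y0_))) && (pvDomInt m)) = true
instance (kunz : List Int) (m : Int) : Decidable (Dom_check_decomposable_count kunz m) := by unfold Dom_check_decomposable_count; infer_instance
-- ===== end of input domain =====

-- B replaces A's per-target inner scan by building a residue -> value-set dict over all pairs once,
-- then looking each target up (alternative decomposition; same asymptotic cost).


-- ===== PORT A =====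
-- inner 'for i in range(n): … break' loop of A, as a recursion over the range list
def pvInnerA (kunz : List Int) (m r_res : Int) : List Int → Bool
  | [] => false
  | i :: rest =>
    let i_res := i + 1
    let j_res := PySem.Int.mod (r_res - i_res) m
    if j_res = 0 then pvInnerA kunz m r_res rest
    else
      let j := j_res - 1
      let overflow := PySem.Int.floordiv (i_res + j_res) m
      if PySem.List.pyGetD kunz i 0 + PySem.List.pyGetD kunz j 0 + overflow =
          PySem.List.pyGetD kunz (r_res - 1) 0 then true
      else pvInnerA kunz m r_res rest

def check_decomposable_count (kunz : List Int) (m : Int) : Int :=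
  let n := m - 1
  (PySem.List.pyRange 0 n 1).foldl
    (fun count r =>
      if pvInnerA kunz m (r + 1) (PySem.List.pyRange 0 n 1) then count + 1 else count)
    0

-- ===== PORT B =====
-- B's first pass: table.setdefault(r_res, set()).add(kunz[i] + kunz[j] + s // m)
def pvTableB (kunz : List Int) (m n : Int) : PySem.Dict Int (PySem.Set Int) :=
  (PySem.List.pyRange 0 n 1).foldl
    (fun t i =>
      (PySem.List.pyRange 0 n 1).foldl
        (fun t j =>
          let s := (i + 1) + (j + 1)
          let r_res := PySem.Int.mod s m
          if r_res = 0 then t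
          else
            t.insert r_res
              (PySem.Set.add (t.getD r_res PySem.Set.empty)
                (PySem.List.pyGetD kunz i 0 + PySem.List.pyGetD kunz j 0 +
                  PySem.Int.floordiv s m)))
        t)
    PySem.Dict.empty

def check_decomposable_count_alt (kunz : List Int) (m : Int) : Int :=
  let n := m - 1
  let table := pvTableB kunz m n
  (PySem.List.pyRange 0 n 1).foldl
    (fun count r =>
      match table.get? (r + 1) with
      | none => count
      | some vals =>
        if PySem.List.pyGetD kunz r 0 ∈ vals then count + 1 else count)
    0

-- ===== PRECONDITION & SPEC =====
-- A raises IndexError exactly when m ≥ 3 and len(kunz) < m - 1 (already at r = 0, i = 1);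
-- for m ≤ 2 the loops never index out of range. Pre_ excludes exactly the raising inputs.
def Pre_check_decomposable_count (kunz : List Int) (m : Int) : Prop :=
  m ≤ 2 ∨ m - 1 ≤ (kunz.length : Int)
instance (kunz : List Int) (m : Int) : Decidable (Pre_check_decomposable_count kunz m) := by
  unfold Pre_check_decomposable_count; infer_instance

def pvWitness_check_decomposable_count : List Int × Int := ([1, 1, 2], 4)

def Spec_check_decomposable_count (kunz : List Int) (m : Int) (out : Int) : Prop :=
  out = check_decomposable_count_alt kunz m
instance (kunz : List Int) (m : Int) (out : Int) :
    Decidable (Spec_check_decomposable_count kunz m out) := by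
  unfold Spec_check_decomposable_count; infer_instance

-- ===== CLAIM (what is proved, stated in full; the proofs are below) =====
def Claim_equal_check_decomposable_count : Prop :=
  ∀ (kunz : List Int) (m : Int), Dom_check_decomposable_count kunz m →
    Pre_check_decomposable_count kunz m →
    Spec_check_decomposable_count kunz m (check_decomposable_count kunz m)

-- ===== LEMMAS AND PROOFS =====

-- the condition A's inner loop tests at index i (target residue rr)
def pvCondA (kunz : List Int) (m rr i : Int) : Prop :=
  PySem.Int.mod (rr - (i + 1)) m ≠ 0 ∧
  PySem.List.pyGetD kunz i 0 +
      PySem.List.pyGetD kunz (PySem.Int.mod (rr - (i + 1)) m - 1) 0 +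
      PySem.Int.floordiv ((i + 1) + PySem.Int.mod (rr - (i + 1)) m) m =
    PySem.List.pyGetD kunz (rr - 1) 0

-- "pair (i, j) contributes value v at key k" for B's table
def pvCondB (kunz : List Int) (m i j k v : Int) : Prop :=
  PySem.Int.mod ((i + 1) + (j + 1)) m = k ∧ k ≠ 0 ∧
  v = PySem.List.pyGetD kunz i 0 + PySem.List.pyGetD kunz j 0 +
        PySem.Int.floordiv ((i + 1) + (j + 1)) m

-- one step of B's table-building loop
def pvStepB (kunz : List Int) (m : Int) (t : PySem.Dict Int (PySem.Set Int)) (i j : Int) :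
    PySem.Dict Int (PySem.Set Int) :=
  let s := (i + 1) + (j + 1)
  let r_res := PySem.Int.mod s m
  if r_res = 0 then t
  else
    t.insert r_res
      (PySem.Set.add (t.getD r_res PySem.Set.empty)
        (PySem.List.pyGetD kunz i 0 + PySem.List.pyGetD kunz j 0 + PySem.Int.floordiv s m))

lemma pvInnerA_iff (kunz : List Int) (m rr : Int) (L : List Int) :
    pvInnerA kunz m rr L = true ↔ ∃ i ∈ L, pvCondA kunz m rr i := by
  induction L with
  | nil => simp [pvInnerA]
  | cons a L ih =>
    simp only [pvInnerA]
    by_cases h0 : PySem.Int.mod (rr - (a + 1)) m = 0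
    · simp only [if_pos h0, ih, List.mem_cons]
      constructor
      · rintro ⟨i, hi, hc⟩; exact ⟨i, Or.inr hi, hc⟩
      · rintro ⟨i, hi | hi, hc⟩
        · subst hi; exact absurd h0 hc.1
        · exact ⟨i, hi, hc⟩
    · rw [if_neg h0]
      by_cases h1 : PySem.List.pyGetD kunz a 0 +
          PySem.List.pyGetD kunz (PySem.Int.mod (rr - (a + 1)) m - 1) 0 +
          PySem.Int.floordiv ((a + 1) + PySem.Int.mod (rr - (a + 1)) m) m =
          PySem.List.pyGetD kunz (rr - 1) 0
      · rw [if_pos h1]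
        simp only [true_iff]
        exact ⟨a, List.mem_cons_self, h0, h1⟩
      · rw [if_neg h1, ih]
        constructor
        · rintro ⟨i, hi, hc⟩; exact ⟨i, List.mem_cons_of_mem _ hi, hc⟩
        · rintro ⟨i, hi, hc⟩
          rcases List.mem_cons.mp hi with h | h
          · subst h; exact absurd hc.2 h1
          · exact ⟨i, h, hc⟩

lemma pvMemStep (kunz : List Int) (m : Int) (t : PySem.Dict Int (PySem.Set Int))
    (i j k v : Int) :
    v ∈ (pvStepB kunz m t i j).getD k PySem.Set.empty ↔
      v ∈ t.getD k PySem.Set.empty ∨ pvCondB kunz m i j k v := by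
  unfold pvStepB pvCondB
  by_cases h : PySem.Int.mod ((i + 1) + (j + 1)) m = 0
  · simp only [if_pos h]
    constructor
    · exact Or.inl
    · rintro (hv | ⟨hk, hk0, _⟩)
      · exact hv
      · exact absurd (hk ▸ h) hk0
  · simp only [if_neg h]
    rw [PySem.Dict.getD_insert]
    by_cases hk : k = PySem.Int.mod ((i + 1) + (j + 1)) m
    · rw [if_pos hk, PySem.Set.mem_add]
      subst hk
      constructor
      · rintro (hv | hv)
        · exact Or.inl hv
        · exact Or.inr ⟨rfl, fun h' => h (h' ▸ rfl), hv⟩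
      · rintro (hv | ⟨_, _, hv⟩)
        · exact Or.inl hv
        · exact Or.inr hv
    · rw [if_neg hk]
      constructor
      · exact Or.inl
      · rintro (hv | ⟨hkk, _, _⟩)
        · exact hv
        · exact absurd hkk.symm hk

lemma pvMemInner (kunz : List Int) (m i : Int) (L : List Int) :
    ∀ (t : PySem.Dict Int (PySem.Set Int)) (k v : Int),
      v ∈ (L.foldl (fun t j => pvStepB kunz m t i j) t).getD k PySem.Set.empty ↔
        v ∈ t.getD k PySem.Set.empty ∨ ∃ j ∈ L, pvCondB kunz m i j k v := by
  induction L with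
  | nil => intro t k v; simp
  | cons a L ih =>
    intro t k v
    simp only [List.foldl_cons, ih, pvMemStep, List.mem_cons]
    constructor
    · rintro ((hv | hc) | ⟨j, hj, hc⟩)
      · exact Or.inl hv
      · exact Or.inr ⟨a, Or.inl rfl, hc⟩
      · exact Or.inr ⟨j, Or.inr hj, hc⟩
    · rintro (hv | ⟨j, hj | hj, hc⟩)
      · exact Or.inl (Or.inl hv)
      · subst hj; exact Or.inl (Or.inr hc)
      · exact Or.inr ⟨j, hj, hc⟩

lemma pvMemOuter (kunz : List Int) (m : Int) (M : List Int) (L : List Int) :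
    ∀ (t : PySem.Dict Int (PySem.Set Int)) (k v : Int),
      v ∈ (L.foldl (fun t i => M.foldl (fun t j => pvStepB kunz m t i j) t) t).getD k
            PySem.Set.empty ↔
        v ∈ t.getD k PySem.Set.empty ∨ ∃ i ∈ L, ∃ j ∈ M, pvCondB kunz m i j k v := by
  induction L with
  | nil => intro t k v; simp
  | cons a L ih =>
    intro t k v
    simp only [List.foldl_cons, ih, pvMemInner, List.mem_cons]
    constructor
    · rintro ((hv | ⟨j, hj, hc⟩) | ⟨i, hi, hrest⟩)
      · exact Or.inl hv
      · exact Or.inr ⟨a, Or.inl rfl, j, hj, hc⟩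
      · exact Or.inr ⟨i, Or.inr hi, hrest⟩
    · rintro (hv | ⟨i, hi | hi, hrest⟩)
      · exact Or.inl (Or.inl hv)
      · subst hi; exact Or.inl (Or.inr hrest)
      · exact Or.inr ⟨i, hi, hrest⟩

lemma pvMemTable (kunz : List Int) (m n k v : Int) :
    v ∈ (pvTableB kunz m n).getD k PySem.Set.empty ↔
      ∃ i ∈ PySem.List.pyRange 0 n 1, ∃ j ∈ PySem.List.pyRange 0 n 1,
        pvCondB kunz m i j k v := by
  have hT : pvTableB kunz m n =
      (PySem.List.pyRange 0 n 1).foldl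
        (fun t i => (PySem.List.pyRange 0 n 1).foldl (fun t j => pvStepB kunz m t i j) t)
        PySem.Dict.empty := rfl
  rw [hT, pvMemOuter]
  simp [PySem.Dict.getD_empty, PySem.Set.empty]

-- residue uniqueness: a % m = b when m ∣ a - b and 0 ≤ b < m
lemma pvModUnique (a b m : Int) (hm : 0 < m) (hdvd : m ∣ a - b) (h0 : 0 ≤ b) (h1 : b < m) :
    PySem.Int.mod a m = b := by
  rw [PySem.Int.mod_eq_emod_of_pos hm]
  obtain ⟨q, hq⟩ := hdvd
  have ha : a = b + m * q := by linarith
  rw [ha, Int.add_mul_emod_self_left, Int.emod_eq_of_lt h0 h1]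

lemma pvModDvd (a m : Int) (hm : 0 < m) : m ∣ a - PySem.Int.mod a m := by
  rw [PySem.Int.mod_eq_emod_of_pos hm]
  exact ⟨a / m, by rw [Int.emod_def]; ring⟩

-- the bijection i ↦ (i, j_res - 1) between A's successful scan indices and B's pairs at key r+1
lemma pvBridge (kunz : List Int) (m r : Int) (hr0 : 0 ≤ r) (hr : r < m - 1) :
    ((∃ i ∈ PySem.List.pyRange 0 (m - 1) 1, pvCondA kunz m (r + 1) i) ↔
      ∃ i ∈ PySem.List.pyRange 0 (m - 1) 1, ∃ j ∈ PySem.List.pyRange 0 (m - 1) 1,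
        pvCondB kunz m i j (r + 1) (PySem.List.pyGetD kunz r 0)) := by
  have hm : 0 < m := by omega
  have hrr : r + 1 - 1 = r := by ring
  constructor
  · rintro ⟨i, hi, hne, heq⟩
    obtain ⟨hi0, hilt⟩ := (PySem.List.mem_pyRange_one).mp hi
    set jr := PySem.Int.mod (r + 1 - (i + 1)) m with hjr
    have hjr0 : 0 ≤ jr := PySem.Int.mod_nonneg _ hm
    have hjrlt : jr < m := PySem.Int.mod_lt _ hm
    have hjr1 : 1 ≤ jr := by
      rcases lt_or_eq_of_le hjr0 with h | h
      · omega
      · exact absurd h.symm hne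
    refine ⟨i, hi, jr - 1, ?_, ?_, ?_, ?_⟩
    · exact (PySem.List.mem_pyRange_one).mpr ⟨by omega, by omega⟩
    · -- mod ((i+1) + (jr - 1 + 1)) m = r + 1
      have h1 : (i + 1) + (jr - 1 + 1) = i + 1 + jr := by ring
      rw [h1]
      apply pvModUnique _ _ _ hm _ (by omega) (by omega)
      have := pvModDvd (r + 1 - (i + 1)) m hm
      obtain ⟨q, hq⟩ := this
      exact ⟨-q, by rw [← hjr] at hq; linarith⟩
    · omega
    · have h1 : (i + 1) + (jr - 1 + 1) = (i + 1) + jr := by ring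
      rw [h1]
      rw [hrr] at heq
      exact heq.symm
  · rintro ⟨i, hi, j, hj, hmod, _, hv⟩
    obtain ⟨hj0, hjlt⟩ := (PySem.List.mem_pyRange_one).mp hj
    have hjr : PySem.Int.mod (r + 1 - (i + 1)) m = j + 1 := by
      apply pvModUnique _ _ _ hm _ (by omega) (by omega)
      have := pvModDvd ((i + 1) + (j + 1)) m hm
      rw [hmod] at this
      obtain ⟨q, hq⟩ := this
      exact ⟨-q, by linarith⟩
    refine ⟨i, hi, ?_, ?_⟩
    · rw [hjr]; omega
    · rw [hjr, hrr]
      have h1 : j + 1 - 1 = j := by ring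
      have h2 : (i + 1) + (j + 1) = i + 1 + (j + 1) := by ring
      rw [h1, ← h2, ← hv]

-- ===== VERDICT (by name: the statement is the Claim_ definition above) =====
theorem check_decomposable_count_spec : Claim_equal_check_decomposable_count := by
  intro kunz m _ _
  unfold Spec_check_decomposable_count
  unfold check_decomposable_count check_decomposable_count_alt
  dsimp only
  by_cases hn : m - 1 ≤ 0
  · rw [PySem.List.pyRange_one_eq_nil hn]
    rfl
  · apply PySem.List.foldl_congr_mem'
    intro r hr acc
    obtain ⟨hr0, hrlt⟩ := (PySem.List.mem_pyRange_one).mp hr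
    have key : pvInnerA kunz m (r + 1) (PySem.List.pyRange 0 (m - 1) 1) = true ↔
        PySem.List.pyGetD kunz r 0 ∈ (pvTableB kunz m (m - 1)).getD (r + 1) PySem.Set.empty := by
      rw [pvInnerA_iff, pvMemTable]
      exact pvBridge kunz m r hr0 (by omega)
    cases hg : (pvTableB kunz m (m - 1)).get? (r + 1) with
    | none =>
      have hempty : (pvTableB kunz m (m - 1)).getD (r + 1) PySem.Set.empty = PySem.Set.empty := by
        simp [PySem.Dict.getD_eq_get?_getD, hg]
      dsimp only
      rw [if_neg]
      intro hA
      have := key.mp hA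
      rw [hempty] at this
      simp [PySem.Set.empty] at this
    | some vals =>
      have hvals : (pvTableB kunz m (m - 1)).getD (r + 1) PySem.Set.empty = vals := by
        simp [PySem.Dict.getD_eq_get?_getD, hg]
      rw [hvals] at key
      dsimp only
      by_cases hmem : PySem.List.pyGetD kunz r 0 ∈ vals
      · rw [if_pos (key.mpr hmem), if_pos hmem]
      · rw [if_neg (fun h => hmem (key.mp h)), if_neg hmem]
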